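-- pv_equiv track=rewrite | github.com/vinegarist/G-thesis | tools/reference_audit.py | strip_tex_comment
-- ===== SOURCE A (Python) =====
-- from typing import Dict, Iterable, Iterator, List, Optional, Sequence, Tuple
--
-- def strip_tex_comment(line: str) -> str:
--     r"""Remove TeX comments (%) while preserving escaped \%."""
--     out_chars: List[str] = []
--     i = 0
--     while i < len(line):
--         ch = line[i]
--         if ch == "%":
--             # if escaped with backslash, keep it
--             if i > 0 and line[i - 1] == "\\":
--                 out_chars.append(ch)
--                 i += 1
--                 continue
--             break
--         out_chars.append(ch)
--         i += 1
--     return "".join(out_chars)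
-- ===== SOURCE B (Python) =====
-- import re
--
-- _UNESCAPED_PCT = re.compile(r"(?<!\\)%")
--
-- def strip_tex_comment(line: str) -> str:
--     r"""Remove TeX comments (%) while preserving escaped \%."""
--     m = _UNESCAPED_PCT.search(line)
--     return line if m is None else line[:m.start()]
-- ===== Notes on version B (the rewrite author's own statement) =====
-- stated objective: idiomatic
-- what changed: Replaced the char-by-char accumulator loop by a single regex search for the first unescaped percent sign (one-character negative lookbehind) followed by one slice.
import Mathlib
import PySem

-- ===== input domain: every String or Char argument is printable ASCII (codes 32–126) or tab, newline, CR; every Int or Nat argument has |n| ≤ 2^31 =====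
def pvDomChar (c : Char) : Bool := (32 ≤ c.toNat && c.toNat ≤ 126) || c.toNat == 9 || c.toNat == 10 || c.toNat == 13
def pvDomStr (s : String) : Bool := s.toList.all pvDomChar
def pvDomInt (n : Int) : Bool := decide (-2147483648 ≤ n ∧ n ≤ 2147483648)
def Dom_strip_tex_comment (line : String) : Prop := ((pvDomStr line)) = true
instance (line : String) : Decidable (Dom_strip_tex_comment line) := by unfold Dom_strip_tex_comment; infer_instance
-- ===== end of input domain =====

-- B replaces A's char-by-char accumulator loop with a regex-style search for the
-- first unescaped '%' followed by one prefix slice (objective: idiomatic).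

-- ===== PORT A =====
-- A's while-loop: `prev` is line[i-1] (none at i = 0), output chars are accumulated.
def stripGoA (prev : Option Char) : List Char → List Char
  | [] => []
  | c :: rest =>
    if c = '%' then
      if prev = some '\\' then c :: stripGoA (some c) rest
      else []
    else c :: stripGoA (some c) rest

def strip_tex_comment (line : String) : String :=
  String.mk (stripGoA none line.toList)

-- ===== PORT B =====
-- hand port of re.search(r"(?<!\\)%", line): offset of the first '%' whose
-- immediately preceding character is not '\\' (exact on this one-char lookbehind)
def findUnescapedPct (prev : Option Char) : List Char → Option Nat
  | [] => none
  | c :: rest =>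
    if c = '%' ∧ prev ≠ some '\\' then some 0
    else (findUnescapedPct (some c) rest).map (· + 1)

def strip_tex_comment_alt (line : String) : String :=
  match findUnescapedPct none line.toList with
  | none => line            -- no match: return the line unchanged
  | some m => String.mk (line.toList.take m)   -- line[:m.start()]

-- ===== PRECONDITION & SPEC =====
def Spec_strip_tex_comment (line : String) (out : String) : Prop := out = strip_tex_comment_alt line
instance (line : String) (out : String) : Decidable (Spec_strip_tex_comment line out) := by unfold Spec_strip_tex_comment; infer_instance

-- ===== CLAIM (what is proved, stated in full; the proofs are below) =====
def Claim_equal_strip_tex_comment : Prop := ∀ (line : String), Dom_strip_tex_comment line → Spec_strip_tex_comment line (strip_tex_comment line)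

-- ===== LEMMAS AND PROOFS =====
theorem stripGoA_eq_search (l : List Char) : ∀ prev,
    stripGoA prev l = match findUnescapedPct prev l with
      | none => l
      | some m => l.take m := by
  induction l with
  | nil => intro prev; simp [stripGoA, findUnescapedPct]
  | cons c rest ih =>
    intro prev
    by_cases hc : c = '%' ∧ prev ≠ some '\\'
    · simp [stripGoA, findUnescapedPct, hc]
    · have h : stripGoA prev (c :: rest) = c :: stripGoA (some c) rest := by
        by_cases h1 : c = '%'
        · have h2 : prev = some '\\' := by
            by_contra h2; exact hc ⟨h1, h2⟩
          simp [stripGoA, h1, h2]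
        · simp [stripGoA, h1]
      rw [h, ih (some c)]
      simp only [findUnescapedPct, if_neg hc]
      cases findUnescapedPct (some c) rest <;> simp

-- ===== VERDICT (by name: the statement is the Claim_ definition above) =====
theorem strip_tex_comment_spec : Claim_equal_strip_tex_comment := by
  intro line _
  unfold Spec_strip_tex_comment strip_tex_comment strip_tex_comment_alt
  rw [stripGoA_eq_search]
  cases findUnescapedPct none line.toList <;> simp [String.mk]
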